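-- pv_equiv track=rewrite | github.com/JonnyBro/makarov | makarov/modules/markov.py | create_markov_chain
-- ===== SOURCE A (Python) =====
-- from collections import defaultdict
-- import queue
--
-- def create_markov_chain(tokens, order):
--     if order > len(tokens):
--         raise Exception('Order greater than number of tokens.')
--     markov_chain = defaultdict(lambda: defaultdict(int))
--     current_state_queue = queue.Queue()
--     for index, token in enumerate(tokens):
--         if index < order:
--             current_state_queue.put(token)
--             if index == order - 1:
--                 current_state = ' '.join(list(current_state_queue.queue))
--         elif index < len(tokens):
--             current_state_queue.get()
--             current_state_queue.put(token)
--             next_state = ' '.join(list(current_state_queue.queue))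
--             markov_chain[current_state][next_state] += 1
--             current_state = next_state
--     return markov_chain
-- ===== SOURCE B (Python) =====
-- from collections import defaultdict
--
--
-- def create_markov_chain(tokens, order):
--     if order > len(tokens):
--         raise Exception('Order greater than number of tokens.')
--     markov_chain = defaultdict(lambda: defaultdict(int))
--     states = [' '.join(tokens[i:i + order]) for i in range(len(tokens) - order + 1)]
--     for a, b in zip(states, states[1:]):
--         markov_chain[a][b] += 1
--     return markov_chain
-- ===== Notes on version B (the rewrite author's own statement) =====
-- stated objective: simpler
-- what changed: Replaces the single stateful sweep with a mutable queue.Queue and index-phase branching by a two-phase pass: first materialize all order-length window strings via list slicing, then count transitions between adjacent windows with zip.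
-- outside the precondition, e.g. on create_markov_chain([], -1): A returns {}, B returns {'': {'': 1}}; on create_markov_chain([], 0): A returns {}, B returns {}; on create_markov_chain(['a'], 0): A does not finish within the time limit, B returns {'': {'': 1}}
import Mathlib
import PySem

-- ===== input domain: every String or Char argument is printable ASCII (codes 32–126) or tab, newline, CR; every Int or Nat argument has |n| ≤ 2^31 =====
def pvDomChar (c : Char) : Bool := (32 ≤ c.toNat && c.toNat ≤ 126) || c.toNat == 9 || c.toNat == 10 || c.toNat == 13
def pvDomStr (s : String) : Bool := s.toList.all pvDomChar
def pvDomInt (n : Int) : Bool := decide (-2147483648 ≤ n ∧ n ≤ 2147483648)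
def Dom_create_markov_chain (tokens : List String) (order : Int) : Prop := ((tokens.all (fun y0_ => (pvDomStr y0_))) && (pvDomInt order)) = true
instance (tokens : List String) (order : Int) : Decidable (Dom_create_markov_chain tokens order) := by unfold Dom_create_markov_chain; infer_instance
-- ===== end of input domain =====

-- B replaces A's stateful queue-sweep by a two-phase pass (build all window strings, then
-- count transitions between adjacent windows); objective: simpler. Equivalence is claimed
-- for 1 ≤ order ≤ len(tokens) (see Pre_ below).

-- ===== PORT A =====
-- 'markov_chain[cur][next] += 1' on a defaultdict(lambda: defaultdict(int)) — the same
-- Python line occurs verbatim in A and in B, so both ports use this helper.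
def pvBump (c : PySem.Dict String (PySem.Dict String Int)) (a b : String) :
    PySem.Dict String (PySem.Dict String Int) :=
  let inner := c.getD a PySem.Dict.empty
  c.insert a (inner.insert b (inner.getD b 0 + 1))

-- one iteration of A's 'for index, token in enumerate(tokens)' body; state = (queue, current_state, markov_chain)
def pvAStep (order : Int)
    (st : List String × String × PySem.Dict String (PySem.Dict String Int))
    (it : Int × String) :
    List String × String × PySem.Dict String (PySem.Dict String Int) :=
  let (q, cur, chain) := st
  let (index, token) := it
  if index < order then
    let q2 := q ++ [token]
    (q2, if index == order - 1 then PySem.Str.join " " q2 else cur, chain)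
  else
    let q2 := q.tail ++ [token]          -- queue.get(); queue.put(token)
    let next := PySem.Str.join " " q2
    (q2, next, pvBump chain cur next)

def create_markov_chain (tokens : List String) (order : Int) : List (String × List (String × Int)) :=
  if order > (PySem.List.len tokens) then []   -- Python: raise Exception(...) — excluded by Pre_
  else
    let r := (PySem.List.enumerate tokens).foldl (pvAStep order) ([], "", PySem.Dict.empty)
    r.2.2.items.map (fun p => (p.1, p.2.items))

-- ===== PORT B =====
def create_markov_chain_alt (tokens : List String) (order : Int) : List (String × List (String × Int)) :=
  if order > (PySem.List.len tokens) then []   -- Python: raise Exception(...) — excluded by Pre_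
  else
    let states := (PySem.List.pyRange 0 (PySem.List.len tokens - order + 1) 1).map
      (fun i => PySem.Str.join " " (PySem.List.slice tokens (some i) (some (i + order))))
    let chain := (states.zip states.tail).foldl (fun c p => pvBump c p.1 p.2) PySem.Dict.empty
    chain.items.map (fun p => (p.1, p.2.items))

-- ===== PRECONDITION & SPEC =====
-- Pre_ excludes order > len(tokens), where A raises, and non-positive order, where A never
-- returns on non-empty tokens (queue.Queue().get() blocks forever) and its empty dict on
-- empty tokens is an accident of the loop body never running.
def Pre_create_markov_chain (tokens : List String) (order : Int) : Prop :=
  1 ≤ order ∧ order ≤ (tokens.length : Int)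
instance (tokens : List String) (order : Int) : Decidable (Pre_create_markov_chain tokens order) := by
  unfold Pre_create_markov_chain; infer_instance

def pvWitness_create_markov_chain : List String × Int := (["a", "b", "a", "b"], 2)

def Spec_create_markov_chain (tokens : List String) (order : Int) (out : List (String × List (String × Int))) : Prop := out = create_markov_chain_alt tokens order
instance (tokens : List String) (order : Int) (out : List (String × List (String × Int))) : Decidable (Spec_create_markov_chain tokens order out) := by unfold Spec_create_markov_chain; infer_instance

-- ===== CLAIM (what is proved, stated in full; the proofs are below) =====
def Claim_equal_create_markov_chain : Prop := ∀ (tokens : List String) (order : Int), Dom_create_markov_chain tokens order → Pre_create_markov_chain tokens order → Spec_create_markov_chain tokens order (create_markov_chain tokens order)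

-- ===== LEMMAS AND PROOFS =====

-- the window string starting at position i
def pvSt (tokens : List String) (ord i : Nat) : String :=
  PySem.Str.join " " ((tokens.drop i).take ord)

theorem pv_tail_take {α : Type} (l : List α) (n : Nat) : (l.take n).tail = l.tail.take (n - 1) := by
  induction l with
  | nil => simp
  | cons a t ih => cases n <;> simp

-- adjacent pairs of (range' j c).map f
theorem pv_zip_adj {α : Type} (c : Nat) (j : Nat) (f : Nat → α) :
    ((List.range' j c).map f).zip (((List.range' j c).map f).tail)
      = (List.range' j (c - 1)).map (fun k => (f k, f (k + 1))) := by
  induction c generalizing j with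
  | zero => simp
  | succ c ih =>
    cases c with
    | zero => simp
    | succ c =>
      have h1 : List.range' j (c + 1 + 1) = j :: List.range' (j + 1) (c + 1) := by
        simp [List.range'_succ]
      have h2 : List.range' (j + 1) (c + 1) = (j + 1) :: List.range' (j + 2) c := by
        simp [List.range'_succ]
      have ih' := ih (j + 1)
      rw [h1, h2] at ⊢
      rw [h2] at ih'
      simp only [List.map_cons, List.zip_cons_cons, List.tail_cons] at ih' ⊢
      rw [ih']
      have h3 : List.range' j (c + 1 + 1 - 1) = j :: List.range' (j + 1) (c + 1 - 1) := by
        simp [List.range'_succ]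
      rw [h3]
      simp

-- A's prefix phase (indices < order) fills the queue and sets current_state at index order-1
theorem pv_prefix (tokens : List String) (ord : Nat) (hord : 1 ≤ ord)
    (hlen : ord ≤ tokens.length) :
    ∀ i, i ≤ ord →
    ((PySem.List.enumerate tokens).take i).foldl (pvAStep (ord : Int)) ([], "", PySem.Dict.empty)
      = (tokens.take i, if i = ord then pvSt tokens ord 0 else "", PySem.Dict.empty) := by
  intro i hi
  induction i with
  | zero =>
    simp only [List.take_zero, List.foldl_nil]
    rw [if_neg (by omega)]
  | succ i ih =>
    have hi' : i ≤ ord := by omega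
    have hilen : i < tokens.length := by omega
    have hebound : i < (PySem.List.enumerate tokens).length := by
      rw [PySem.List.length_enumerate]; omega
    rw [List.take_add_one, List.foldl_append, ih hi',
        List.getElem?_eq_getElem hebound, PySem.List.getElem_enumerate]
    simp only [Option.toList_some, List.foldl_cons, List.foldl_nil, pvAStep, zero_add]
    rw [if_pos (by exact_mod_cast (by omega : i < ord))]
    have hq : tokens.take i ++ [tokens[i]] = tokens.take (i + 1) := by
      rw [List.take_add_one, List.getElem?_eq_getElem hilen]; simp
    by_cases h : i + 1 = ord
    · have hbeq : ((i : Int) == (ord : Int) - 1) = true := by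
        rw [beq_iff_eq]; omega
      rw [if_pos h]
      simp only [hbeq, if_true, hq, Prod.mk.injEq, true_and]
      constructor
      · unfold pvSt; rw [List.drop_zero, h]
      · trivial
    · have hbeq : ((i : Int) == (ord : Int) - 1) = false := by
        rw [beq_eq_false_iff_ne]; intro hc; omega
      rw [if_neg h, if_neg (by omega : ¬ i = ord)]
      simp [hbeq, hq]

-- A's main phase: from state (window k-ord, st (k-ord), c) the rest of the loop folds pvBump
-- over the adjacent-window pairs starting at k-ord
theorem pv_suffix (tokens : List String) (ord : Nat) (hord : 1 ≤ ord) :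
    ∀ (d : Nat) (k : Nat) (c : PySem.Dict String (PySem.Dict String Int)),
    ord ≤ k → k ≤ tokens.length → d = tokens.length - k →
    (((PySem.List.enumerate tokens).drop k).foldl (pvAStep (ord : Int))
        ((tokens.drop (k - ord)).take ord, pvSt tokens ord (k - ord), c)).2.2
      = ((List.range' (k - ord) (tokens.length - k)).map
          (fun j => (pvSt tokens ord j, pvSt tokens ord (j + 1)))).foldl
          (fun c p => pvBump c p.1 p.2) c := by
  intro d
  induction d with
  | zero =>
    intro k c h1 h2 h3
    have hk : k = tokens.length := by omega
    have hel : (PySem.List.enumerate tokens).length = tokens.length := PySem.List.length_enumerate ..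
    have hdrop : (PySem.List.enumerate tokens).drop k = [] := by
      apply List.drop_eq_nil_of_le; omega
    rw [hdrop, hk]
    simp
  | succ d ih =>
    intro k c h1 h2 h3
    have hklen : k < tokens.length := by omega
    have hebound : k < (PySem.List.enumerate tokens).length := by
      rw [PySem.List.length_enumerate]; omega
    rw [List.drop_eq_getElem_cons hebound, PySem.List.getElem_enumerate]
    simp only [List.foldl_cons, pvAStep, zero_add]
    rw [if_neg (by exact_mod_cast (by omega : ¬ (k : Int) < (ord : Int)))]
    have hq2 : ((tokens.drop (k - ord)).take ord).tail ++ [tokens[k]]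
        = (tokens.drop (k + 1 - ord)).take ord := by
      rw [pv_tail_take, List.tail_drop]
      have hidx : (tokens.drop (k - ord + 1))[ord - 1]? = some tokens[k] := by
        rw [List.getElem?_drop, show k - ord + 1 + (ord - 1) = k from by omega,
            List.getElem?_eq_getElem hklen]
      have h6 : (tokens.drop (k - ord + 1)).take ord
          = (tokens.drop (k - ord + 1)).take (ord - 1) ++ [tokens[k]] := by
        have h7 := List.take_add_one (l := tokens.drop (k - ord + 1)) (i := ord - 1)
        rw [show ord - 1 + 1 = ord from by omega] at h7
        rw [h7, hidx]; simp
      rw [show k + 1 - ord = k - ord + 1 by omega, h6]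
    rw [hq2]
    have hnext : PySem.Str.join " " ((tokens.drop (k + 1 - ord)).take ord)
        = pvSt tokens ord (k + 1 - ord) := rfl
    rw [hnext]
    have hrange : List.range' (k - ord) (tokens.length - k)
        = (k - ord) :: List.range' (k - ord + 1) (tokens.length - (k + 1)) := by
      rw [show tokens.length - k = (tokens.length - (k+1)) + 1 by omega, List.range'_succ]
    rw [hrange]
    simp only [List.map_cons, List.foldl_cons]
    have := ih (k + 1) (pvBump c (pvSt tokens ord (k - ord)) (pvSt tokens ord (k + 1 - ord)))
      (by omega) (by omega) (by omega)
    rw [show k + 1 - ord = k - ord + 1 by omega] at this ⊢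
    exact this

-- ===== VERDICT (by name: the statement is the Claim_ definition above) =====
theorem create_markov_chain_spec : Claim_equal_create_markov_chain := by
  intro tokens order _hdom hpre
  obtain ⟨h1, h2⟩ := hpre
  unfold Spec_create_markov_chain create_markov_chain create_markov_chain_alt
  set n := tokens.length with hn
  have hord : order = (order.toNat : Int) := by omega
  set ord := order.toNat with hordd
  have hord1 : 1 ≤ ord := by omega
  have hordn : ord ≤ n := by omega
  have hgt : ¬ order > (PySem.List.len tokens) := by
    simp only [PySem.List.len_eq]; omega
  rw [if_neg hgt, if_neg hgt]
  dsimp only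
  -- A side
  have hsplit : PySem.List.enumerate tokens
      = (PySem.List.enumerate tokens).take ord ++ (PySem.List.enumerate tokens).drop ord := by
    rw [List.take_append_drop]
  have hA : ((PySem.List.enumerate tokens).foldl (pvAStep order) ([], "", PySem.Dict.empty)).2.2
      = ((List.range' 0 (n - ord)).map
          (fun j => (pvSt tokens ord j, pvSt tokens ord (j + 1)))).foldl
          (fun c p => pvBump c p.1 p.2) PySem.Dict.empty := by
    rw [hord]
    conv_lhs => rw [hsplit]
    rw [List.foldl_append, pv_prefix tokens ord hord1 hordn ord le_rfl, if_pos rfl]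
    have := pv_suffix tokens ord hord1 (n - ord) ord PySem.Dict.empty le_rfl hordn rfl
    simpa using this
  -- B side
  have hB : (PySem.List.pyRange 0 (PySem.List.len tokens - order + 1) 1).map
        (fun i => PySem.Str.join " " (PySem.List.slice tokens (some i) (some (i + order))))
      = (List.range' 0 (n - ord + 1)).map (pvSt tokens ord) := by
    rw [PySem.List.pyRange_one]
    have htn : ((PySem.List.len tokens - order + 1) - 0).toNat = n - ord + 1 := by
      simp only [PySem.List.len_eq]; omega
    rw [htn, List.map_map, ← List.range_eq_range']
    apply List.map_congr_left
    intro k _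
    simp only [Function.comp_apply, zero_add]
    rw [hord, PySem.List.slice_natCast_add]
    rfl
  rw [hA, hB]
  rw [pv_zip_adj, Nat.add_sub_cancel]

-- (templates removed)
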